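-- pv_equiv track=rewrite | github.com/genggeng88/LeetCode-Notes | python_mid_june_2024/1482. Minimum Number of Days to Make m Bouquets.py | get_num_of_bouquets
-- ===== SOURCE A (Python) =====
-- def get_num_of_bouquets(bloomDay, mid, k):
--     count = 0
--     bouquets = 0
--
--     for bloom in bloomDay:
--         if bloom <= mid:
--             count += 1
--         else:
--             count = 0
--         if count == k:
--             bouquets += 1
--             count =0
--     return bouquets
-- ===== SOURCE B (Python) =====
-- from itertools import groupby
--
-- def get_num_of_bouquets(bloomDay, mid, k):
--     total = 0
--     for bloomed, grp in groupby(bloomDay, key=lambda b: b <= mid):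
--         if bloomed:
--             total += len(list(grp)) // k
--     return total
-- ===== Notes on version B (the rewrite author's own statement) =====
-- stated objective: alternative
-- what changed: Replaces the per-element counter-with-reset scan by a group-then-reduce: maximal runs of bloomed flowers are formed with itertools.groupby and each run of length L contributes L//k bouquets.
-- outside the precondition, e.g. on get_num_of_bouquets([1], 3, 0): A returns 0, B raises ZeroDivisionError; on get_num_of_bouquets([2, 2, 2], 5, -2): A returns 0, B returns -2
import Mathlib
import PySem

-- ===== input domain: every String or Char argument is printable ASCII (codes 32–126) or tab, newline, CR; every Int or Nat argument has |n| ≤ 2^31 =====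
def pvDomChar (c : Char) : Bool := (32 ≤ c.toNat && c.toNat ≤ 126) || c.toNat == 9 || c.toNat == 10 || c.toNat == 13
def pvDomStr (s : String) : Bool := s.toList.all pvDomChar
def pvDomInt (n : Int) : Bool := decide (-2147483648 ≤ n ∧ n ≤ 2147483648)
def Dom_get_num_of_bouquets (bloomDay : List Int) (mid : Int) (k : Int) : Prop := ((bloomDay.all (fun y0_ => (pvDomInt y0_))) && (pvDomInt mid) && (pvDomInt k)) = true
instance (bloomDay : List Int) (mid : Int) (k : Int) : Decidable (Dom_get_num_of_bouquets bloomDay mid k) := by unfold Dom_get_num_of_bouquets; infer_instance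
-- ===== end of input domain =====

-- B replaces A's per-element counter-with-reset scan by a group-then-reduce over maximal
-- bloomed-run lengths (L // k bouquets per run); same O(n) cost, different decomposition.


-- ===== PORT A =====
-- literal port of A: fold over bloomDay with state (count, bouquets)
def get_num_of_bouquets (bloomDay : List Int) (mid : Int) (k : Int) : Int :=
  (bloomDay.foldl
    (fun (s : Int × Int) bloom =>
      let count := if bloom ≤ mid then s.1 + 1 else (0 : Int)
      if count = k then (0, s.2 + 1) else (count, s.2))
    (0, 0)).2

-- ===== PORT B =====
-- lengths of the maximal runs of consecutive elements with b ≤ mid (itertools.groupby on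
-- the predicate, keeping only the True groups); `cur` is the length of the open run
def pvBloomRuns (mid : Int) : List Int → Nat → List Nat
  | [], cur => if cur = 0 then [] else [cur]
  | b :: rest, cur =>
    if b ≤ mid then pvBloomRuns mid rest (cur + 1)
    else if cur = 0 then pvBloomRuns mid rest 0
    else cur :: pvBloomRuns mid rest 0

def get_num_of_bouquets_alt (bloomDay : List Int) (mid : Int) (k : Int) : Int :=
  (pvBloomRuns mid bloomDay 0).foldl
    (fun (total : Int) (L : Nat) => total + PySem.Int.floordiv (L : Int) k) 0

-- ===== PRECONDITION & SPEC =====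
-- Pre_ excludes the non-positive k outside the problem's natural domain on which the
-- programs cannot agree: with a bloomed flower present, for k = 0 B's `// k` raises
-- ZeroDivisionError while A returns the count of unbloomed flowers, and for k < 0 A's
-- `count == k` never fires (A returns 0) while B's floor division yields negative values.
def Pre_get_num_of_bouquets (bloomDay : List Int) (mid : Int) (k : Int) : Prop :=
  1 ≤ k ∨ (k ≤ -1 ∧ ∀ b ∈ bloomDay, mid < b)
instance (bloomDay : List Int) (mid : Int) (k : Int) : Decidable (Pre_get_num_of_bouquets bloomDay mid k) := by unfold Pre_get_num_of_bouquets; infer_instance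

def pvWitness_get_num_of_bouquets : List Int × Int × Int := ([1, 2, 3], 2, 2)

def Spec_get_num_of_bouquets (bloomDay : List Int) (mid : Int) (k : Int) (out : Int) : Prop := out = get_num_of_bouquets_alt bloomDay mid k
instance (bloomDay : List Int) (mid : Int) (k : Int) (out : Int) : Decidable (Spec_get_num_of_bouquets bloomDay mid k out) := by unfold Spec_get_num_of_bouquets; infer_instance

-- ===== CLAIM (what is proved, stated in full; the proofs are below) =====
def Claim_equal_get_num_of_bouquets : Prop := ∀ (bloomDay : List Int) (mid : Int) (k : Int), Dom_get_num_of_bouquets bloomDay mid k → Pre_get_num_of_bouquets bloomDay mid k → Spec_get_num_of_bouquets bloomDay mid k (get_num_of_bouquets bloomDay mid k)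

-- ===== LEMMAS AND PROOFS =====

-- A's loop as a recursion returning the bouquets added from count state c
def pvALoop (mid k : Int) : List Int → Int → Int
  | [], _ => 0
  | b :: rest, c =>
    if (if b ≤ mid then c + 1 else (0 : Int)) = k then 1 + pvALoop mid k rest 0
    else pvALoop mid k rest (if b ≤ mid then c + 1 else (0 : Int))

theorem pvA_foldl (mid k : Int) (l : List Int) : ∀ (c acc : Int),
    (l.foldl
      (fun (s : Int × Int) bloom =>
        let count := if bloom ≤ mid then s.1 + 1 else (0 : Int)
        if count = k then (0, s.2 + 1) else (count, s.2))
      (c, acc)).2 = acc + pvALoop mid k l c := by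
  induction l with
  | nil => intro c acc; simp [pvALoop]
  | cons b rest ih =>
    intro c acc
    simp only [List.foldl_cons, pvALoop]
    by_cases hc : (if b ≤ mid then c + 1 else (0 : Int)) = k
    · simp only [if_pos hc, ih]; ring
    · simp only [if_neg hc, ih]

-- B's sum as a map-sum
def pvSsum (k : Int) (r : List Nat) : Int := (r.map (fun L => PySem.Int.floordiv (L : Int) k)).sum

theorem pvSsum_cons (k : Int) (L : Nat) (r : List Nat) :
    pvSsum k (L :: r) = PySem.Int.floordiv (L : Int) k + pvSsum k r := by
  simp [pvSsum]

theorem pvB_foldl (k : Int) (r : List Nat) : ∀ (acc : Int),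
    (r.foldl (fun (total : Int) (L : Nat) => total + PySem.Int.floordiv (L : Int) k) acc) = acc + pvSsum k r := by
  induction r with
  | nil => intro acc; simp [pvSsum]
  | cons L rest ih => intro acc; rw [List.foldl_cons, ih, pvSsum_cons]; ring

theorem pv_succ_div_mod (n kn : Nat) (h1 : 0 < kn) :
    (n % kn + 1 = kn → (n+1) / kn = n / kn + 1 ∧ (n+1) % kn = 0) ∧
    (n % kn + 1 ≠ kn → (n+1) / kn = n / kn ∧ (n+1) % kn = n % kn + 1) := by
  have hdm := Nat.div_add_mod n kn
  constructor
  · intro h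
    have he : n + 1 = kn * (n / kn + 1) := by rw [Nat.mul_add, Nat.mul_one]; omega
    constructor
    · rw [he, Nat.mul_div_cancel_left _ h1]
    · rw [he, Nat.mul_mod_right]
  · intro h
    have hlt : n % kn + 1 < kn := by have := Nat.mod_lt n h1; omega
    have he : n + 1 = kn * (n / kn) + (n % kn + 1) := by omega
    constructor
    · rw [he, Nat.mul_add_div h1, Nat.div_eq_of_lt hlt, Nat.add_zero]
    · rw [he, Nat.mul_add_mod, Nat.mod_eq_of_lt hlt]

theorem pvALoop_zero (mid k : Int) (hk : k < 0) (l : List Int) :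
    ∀ c : Int, (∀ b ∈ l, mid < b) → pvALoop mid k l c = 0 := by
  induction l with
  | nil => intro c _; rfl
  | cons b rest ih =>
    intro c hall
    have hb : ¬ b ≤ mid := by have := hall b (by simp); omega
    simp only [pvALoop, if_neg hb]
    have hk0 : ¬ ((0 : Int) = k) := by omega
    rw [if_neg hk0]
    exact ih 0 (fun x hx => hall x (by simp [hx]))

theorem pvBloomRuns_nil (mid : Int) (l : List Int) :
    (∀ b ∈ l, mid < b) → pvBloomRuns mid l 0 = [] := by
  induction l with
  | nil => intro _; rfl
  | cons b rest ih =>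
    intro hall
    have hb : ¬ b ≤ mid := by have := hall b (by simp); omega
    simp only [pvBloomRuns, if_neg hb]
    exact ih (fun x hx => hall x (by simp [hx]))

theorem pv_key (mid k : Int) (hk : 1 ≤ k) (l : List Int) : ∀ (n : Nat),
    ((n / k.toNat : Nat) : Int) + pvALoop mid k l ((n % k.toNat : Nat) : Int)
      = pvSsum k (pvBloomRuns mid l n) := by
  have hkn : (k.toNat : Int) = k := Int.toNat_of_nonneg (by omega)
  have hpos : 0 < k.toNat := by omega
  have hfd : ∀ m : Nat, PySem.Int.floordiv (m : Int) k = ((m / k.toNat : Nat) : Int) := by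
    intro m
    calc PySem.Int.floordiv (m : Int) k
        = PySem.Int.floordiv (m : Int) (k.toNat : Int) := by rw [hkn]
      _ = ((m / k.toNat : Nat) : Int) := PySem.Int.floordiv_natCast m k.toNat
  induction l with
  | nil =>
    intro n
    by_cases hn : n = 0
    · simp [pvALoop, pvBloomRuns, pvSsum, hn]
    · simp only [pvBloomRuns, if_neg hn, pvALoop, Int.add_zero]
      rw [pvSsum_cons, hfd]
      simp [pvSsum]
  | cons b rest ih =>
    intro n
    simp only [pvALoop, pvBloomRuns]
    by_cases hb : b ≤ mid
    · simp only [if_pos hb]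
      by_cases hc : n % k.toNat + 1 = k.toNat
      · have hc' : ((n % k.toNat : Nat) : Int) + 1 = k := by
          rw [← hkn]; exact_mod_cast hc
        have h2 := (pv_succ_div_mod n k.toNat hpos).1 hc
        rw [if_pos hc', ← ih (n + 1), h2.1, h2.2]
        push_cast
        ring
      · have hc' : ¬ (((n % k.toNat : Nat) : Int) + 1 = k) := by
          rw [← hkn]; exact_mod_cast hc
        have h2 := (pv_succ_div_mod n k.toNat hpos).2 hc
        rw [if_neg hc', ← ih (n + 1), h2.1, h2.2]
        push_cast
        ring
    · simp only [if_neg hb]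
      have hk0 : ¬ ((0 : Int) = k) := by omega
      rw [if_neg hk0]
      have ih0 := ih 0
      rw [Nat.zero_div, Nat.zero_mod] at ih0
      simp only [Nat.cast_zero, Int.zero_add] at ih0
      by_cases hn : n = 0
      · simp [hn, ih0]
      · rw [if_neg hn, pvSsum_cons, hfd, ← ih0]

-- ===== VERDICT (by name: the statement is the Claim_ definition above) =====
theorem get_num_of_bouquets_spec : Claim_equal_get_num_of_bouquets := by
  intro bloomDay mid k _ hk
  unfold Spec_get_num_of_bouquets get_num_of_bouquets get_num_of_bouquets_alt
  rw [pvA_foldl, pvB_foldl, Int.zero_add, Int.zero_add]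
  rcases hk with hk | ⟨hk, hall⟩
  · have h := pv_key mid k hk bloomDay 0
    rw [Nat.zero_div, Nat.zero_mod] at h
    simpa using h
  · rw [pvALoop_zero mid k (by omega) bloomDay 0 hall, pvBloomRuns_nil mid bloomDay hall]
    rfl
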